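-- pv_equiv track=rewrite | github.com/MorozovIvan52/sud | kad_arbitr_compliance.py | robots_allows_path
-- ===== SOURCE A (Python) =====
-- from typing import Optional, Tuple
--
-- def robots_allows_path(robots_content: Optional[str], path: str = "/") -> bool:
--     """
--     Упрощённая проверка: разрешён ли путь для User-Agent *.
--     Не парсит Crawl-delay (нестандарт); только Disallow.
--     """
--     if not robots_content:
--         return True
--     path = path.rstrip("/") or "/"
--     lines = robots_content.lower().splitlines()
--     disallowed = []
--     in_star = False
--     for line in lines:
--         line = line.strip()
--         if line.startswith("user-agent:"):
--             ua = line.split(":", 1)[1].strip()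
--             in_star = ua == "*"
--             continue
--         if in_star and line.startswith("disallow:"):
--             rule = line.split(":", 1)[1].strip()
--             if rule:
--                 disallowed.append(rule)
--     for rule in disallowed:
--         if path == rule or path.startswith(rule.rstrip("/") + "/") or path.startswith(rule):
--             return False
--     return True
-- ===== SOURCE B (Python) =====
-- def robots_allows_path(robots_content, path="/"):
--     """Stateless re-derivation: no forward-threaded in_star flag; each Disallow
--     line looks UP for its nearest preceding User-agent header, rules are
--     gathered by an index comprehension and judged with not any(...)."""
--     if not robots_content:
--         return True
--     path = path.rstrip("/") or "/"
--     lines = [l.strip() for l in robots_content.lower().splitlines()]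
--
--     def star_governs(i):
--         for prev in reversed(lines[:i]):
--             if prev.startswith("user-agent:"):
--                 return prev.split(":", 1)[1].strip() == "*"
--         return False
--
--     rules = [line.split(":", 1)[1].strip()
--              for i, line in enumerate(lines)
--              if line.startswith("disallow:") and star_governs(i)]
--     return not any(
--         rule and (path == rule
--                   or path.startswith(rule.rstrip("/") + "/")
--                   or path.startswith(rule))
--         for rule in rules)
-- ===== Notes on version B (the rewrite author's own statement) =====
-- stated objective: alternative
-- what changed: Replaced A's forward state machine (in_star flag threaded through a collect loop, then a second scan loop) with a stateless formulation: a comprehension over enumerated lines where each Disallow line searches backwards for its nearest preceding User-agent header, judged with not any(...).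
import Mathlib
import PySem

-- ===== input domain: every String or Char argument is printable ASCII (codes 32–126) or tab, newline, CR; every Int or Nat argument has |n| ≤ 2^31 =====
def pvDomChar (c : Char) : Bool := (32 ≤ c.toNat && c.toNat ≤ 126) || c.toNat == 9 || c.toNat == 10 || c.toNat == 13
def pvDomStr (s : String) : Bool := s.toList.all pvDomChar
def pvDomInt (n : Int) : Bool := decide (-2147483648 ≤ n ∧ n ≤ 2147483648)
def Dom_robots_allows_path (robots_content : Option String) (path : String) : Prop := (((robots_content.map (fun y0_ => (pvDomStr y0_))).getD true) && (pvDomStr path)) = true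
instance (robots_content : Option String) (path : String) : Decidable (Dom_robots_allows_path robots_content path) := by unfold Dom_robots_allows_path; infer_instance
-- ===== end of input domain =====

-- B drops A's forward in_star state machine: each Disallow line looks up its nearest
-- preceding User-agent header; return value proved equal on all inputs.

-- shared exact helpers (both Pythons contain these exact expressions)
-- s.rstrip("/") for the single-char set "/": drop trailing '/' (exact for this call)
def pvRstripSlash (cs : List Char) : List Char :=
  ((cs.reverse).dropWhile (fun c => c == '/')).reverse

-- x.split(":", 1)[1].strip(); callers only reach this when ':' occurs in x,
-- so the split has exactly 2 parts and the [1] index is the getD (exact there)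
def pvAfterColon (line : List Char) : List Char :=
  PySem.Chars.strip ((PySem.Chars.splitOnMax line [':'] 1).getD 1 [])

-- path = path.rstrip("/") or "/"
def pvNormPath (path : List Char) : List Char :=
  let q := pvRstripSlash path
  if q = [] then ['/'] else q

-- ===== PORT A =====
-- path == rule or path.startswith(rule.rstrip("/") + "/") or path.startswith(rule)
def pvRuleHits (path rule : List Char) : Bool :=
  path == rule || PySem.Chars.startswith path (pvRstripSlash rule ++ ['/'])
    || PySem.Chars.startswith path rule

-- first loop of A: thread in_star forward, collect in-star Disallow rules
def pvCollectA (lines : List (List Char)) (in_star : Bool)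
    (disallowed : List (List Char)) : List (List Char) :=
  match lines with
  | [] => disallowed
  | l :: ls =>
    let line := PySem.Chars.strip l
    if PySem.Chars.startswith line ("user-agent:".toList) then
      pvCollectA ls (pvAfterColon line == ['*']) disallowed
    else if in_star && PySem.Chars.startswith line ("disallow:".toList) then
      let rule := pvAfterColon line
      if rule ≠ [] then pvCollectA ls in_star (disallowed ++ [rule])
      else pvCollectA ls in_star disallowed
    else pvCollectA ls in_star disallowed

-- second loop of A: return False on the first matching rule
def pvScanA (path : List Char) (rules : List (List Char)) : Bool :=
  match rules with
  | [] => true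
  | r :: rs => if pvRuleHits path r then false else pvScanA path rs

def robots_allows_path (robots_content : Option String) (path : String) : Bool :=
  match robots_content with
  | none => true
  | some s =>
    if s.toList = [] then true
    else
      let p := pvNormPath path.toList
      let lines := PySem.Chars.splitlines (PySem.Chars.lower s.toList)
      pvScanA p (pvCollectA lines false [])

-- ===== PORT B =====
-- B's star_governs lookup: first user-agent header in `prev` (nearest first)
def pvFindUA (prev : List (List Char)) : Bool :=
  match prev with
  | [] => false
  | l :: ls =>
    if PySem.Chars.startswith l ("user-agent:".toList) then pvAfterColon l == ['*']
    else pvFindUA ls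

def pvStarGoverns (lines : List (List Char)) (i : Int) : Bool :=
  pvFindUA (PySem.List.slice lines none (some i)).reverse

-- rule and (path == rule or path.startswith(rule.rstrip("/") + "/") or path.startswith(rule))
def pvRuleBlocks (path rule : List Char) : Bool :=
  rule ≠ [] && (path == rule || PySem.Chars.startswith path (pvRstripSlash rule ++ ['/'])
    || PySem.Chars.startswith path rule)

def robots_allows_path_alt (robots_content : Option String) (path : String) : Bool :=
  match robots_content with
  | none => true
  | some s =>
    if s.toList = [] then true
    else
      let p := pvNormPath path.toList
      let lines := (PySem.Chars.splitlines (PySem.Chars.lower s.toList)).map PySem.Chars.strip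
      let rules := (PySem.List.enumerate lines 0).filterMap (fun il =>
        if PySem.Chars.startswith il.2 ("disallow:".toList) && pvStarGoverns lines il.1
        then some (pvAfterColon il.2) else none)
      ! rules.any (fun rule => pvRuleBlocks p rule)

-- ===== PRECONDITION & SPEC =====
def Spec_robots_allows_path (robots_content : Option String) (path : String) (out : Bool) : Prop := out = robots_allows_path_alt robots_content path
instance (robots_content : Option String) (path : String) (out : Bool) : Decidable (Spec_robots_allows_path robots_content path out) := by unfold Spec_robots_allows_path; infer_instance

-- ===== CLAIM (what is proved, stated in full; the proofs are below) =====
def Claim_equal_robots_allows_path : Prop := ∀ (robots_content : Option String) (path : String), Dom_robots_allows_path robots_content path → Spec_robots_allows_path robots_content path (robots_allows_path robots_content path)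

-- ===== LEMMAS AND PROOFS =====

-- proof-only recursion: B's enumerate+lookup pass, with the already-seen stripped
-- lines carried nearest-first
def pvAnyRec (path : List Char) (rest prefRev : List (List Char)) : Bool :=
  match rest with
  | [] => false
  | l :: ls =>
    (PySem.Chars.startswith l ("disallow:".toList) && pvFindUA prefRev
      && pvRuleBlocks path (pvAfterColon l))
    || pvAnyRec path ls (l :: prefRev)

theorem pv_not_both (l : List Char) :
    PySem.Chars.startswith l ("user-agent:".toList) = true →
    PySem.Chars.startswith l ("disallow:".toList) = false := by
  cases l with
  | nil => intro h; simp [PySem.Chars.startswith] at h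
  | cons c cs =>
    intro h
    simp [PySem.Chars.startswith, List.isPrefixOf] at h ⊢
    rintro rfl
    simp at h

theorem pvScanA_append_singleton (path : List Char) (rules : List (List Char)) (r : List Char) :
    pvScanA path (rules ++ [r]) = (pvScanA path rules && !pvRuleHits path r) := by
  induction rules with
  | nil => simp [pvScanA]
  | cons a rs ih => simp [pvScanA, ih, Bool.and_assoc]

-- A's state-threaded collect+scan equals B's lookup pass, for matching context
theorem pvScanA_collect (path : List Char) (raws : List (List Char)) :
    ∀ (prefRev dis : List (List Char)),
      pvScanA path (pvCollectA raws (pvFindUA prefRev) dis)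
        = (pvScanA path dis && !pvAnyRec path (raws.map PySem.Chars.strip) prefRev) := by
  induction raws with
  | nil => intro pre dis; simp [pvCollectA, pvAnyRec]
  | cons raw ls ih =>
    intro pre dis
    simp only [pvCollectA, List.map_cons, pvAnyRec]
    by_cases hu : PySem.Chars.startswith (PySem.Chars.strip raw) ("user-agent:".toList) = true
    · have hd := pv_not_both _ hu
      have h1 : (pvAfterColon (PySem.Chars.strip raw) == ['*'])
          = pvFindUA (PySem.Chars.strip raw :: pre) := by
        simp only [pvFindUA, hu, if_true]
      rw [if_pos hu, h1, ih, hd]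
      simp
    · have hu' : PySem.Chars.startswith (PySem.Chars.strip raw) ("user-agent:".toList) = false := by
        simpa using hu
      have h1 : pvFindUA (PySem.Chars.strip raw :: pre) = pvFindUA pre := by
        simp only [pvFindUA, hu', Bool.false_eq_true, if_false]
      rw [if_neg hu]
      by_cases hs : pvFindUA pre = true
      · have hs2 : pvFindUA (PySem.Chars.strip raw :: pre) = true := h1.trans hs
        by_cases hdis : PySem.Chars.startswith (PySem.Chars.strip raw) ("disallow:".toList) = true
        · rw [if_pos (by rw [hs, hdis]; rfl)]
          by_cases hr : pvAfterColon (PySem.Chars.strip raw) = []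
          · have hb : pvRuleBlocks path (pvAfterColon (PySem.Chars.strip raw)) = false := by
              simp [pvRuleBlocks, hr]
            rw [if_neg (by simp [hr]), ← h1, ih, hb]
            simp
          · have hb : pvRuleBlocks path (pvAfterColon (PySem.Chars.strip raw))
                = pvRuleHits path (pvAfterColon (PySem.Chars.strip raw)) := by
              simp [pvRuleBlocks, pvRuleHits, hr]
            rw [if_pos (by simpa using hr), ← h1, ih, pvScanA_append_singleton, hb, hdis, hs2]
            simp [Bool.not_or, Bool.and_assoc]
        · have hdis' : PySem.Chars.startswith (PySem.Chars.strip raw) ("disallow:".toList) = false := by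
            simpa using hdis
          rw [if_neg (by simp only [hdis', Bool.and_false, Bool.false_eq_true, not_false_eq_true]), ← h1, ih, hdis']
          simp
      · have hs' : pvFindUA pre = false := by simpa using hs
        have hs2 : pvFindUA (PySem.Chars.strip raw :: pre) = false := h1.trans hs'
        rw [if_neg (by simp only [hs', Bool.false_and, Bool.false_eq_true, not_false_eq_true]), ← h1, ih, hs2]
        simp

-- B's port expression (enumerate + filterMap + any) equals pvAnyRec
theorem pvAnyRec_enum (p : List Char) (rest : List (List Char)) :
    ∀ (prefRev : List (List Char)),
      ((PySem.List.enumerate rest ((prefRev.length : Int))).filterMap (fun il =>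
          if PySem.Chars.startswith il.2 ("disallow:".toList)
              && pvStarGoverns (prefRev.reverse ++ rest) il.1
          then some (pvAfterColon il.2) else none)).any (fun rule => pvRuleBlocks p rule)
        = pvAnyRec p rest prefRev := by
  induction rest with
  | nil => intro pre; simp [PySem.List.enumerate_nil, pvAnyRec]
  | cons l ls ih =>
    intro pre
    have hgov : pvStarGoverns (pre.reverse ++ l :: ls) ((pre.length : Int)) = pvFindUA pre := by
      unfold pvStarGoverns
      rw [PySem.List.slice_to_natCast]
      rw [show (pre.reverse ++ l :: ls).take pre.length = pre.reverse from by
        rw [List.take_append_of_le_length (by simp)]; simp]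
      simp
    rw [PySem.List.enumerate_cons, List.filterMap_cons]
    simp only [hgov]
    simp only [show pre.reverse ++ l :: ls = ((l :: pre).reverse ++ ls) from by simp]
    simp only [show (pre.length : Int) + 1 = (((l :: pre).length : Nat) : Int) from by
      simp [List.length_cons]]
    simp only [pvAnyRec]
    by_cases hc : (PySem.Chars.startswith l ("disallow:".toList) && pvFindUA pre) = true
    · rw [if_pos hc, List.any_cons, ih (l :: pre)]
      simp only [hc, Bool.true_and]
    · have hc' : (PySem.Chars.startswith l ("disallow:".toList) && pvFindUA pre) = false := by
        simpa using hc
      rw [if_neg hc, ih (l :: pre), hc']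
      simp

-- ===== VERDICT (by name: the statement is the Claim_ definition above) =====
theorem robots_allows_path_spec : Claim_equal_robots_allows_path := by
  intro rc path _
  unfold Spec_robots_allows_path robots_allows_path robots_allows_path_alt
  match rc with
  | none => rfl
  | some s =>
    by_cases h : s.toList = []
    · simp [h]
    · simp only [h, if_false]
      have hA := pvScanA_collect (pvNormPath path.toList)
        (PySem.Chars.splitlines (PySem.Chars.lower s.toList)) [] []
      have hB := pvAnyRec_enum (pvNormPath path.toList)
        ((PySem.Chars.splitlines (PySem.Chars.lower s.toList)).map PySem.Chars.strip) []
      simp only [pvFindUA, pvScanA, Bool.true_and, List.length_nil, Nat.cast_zero,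
        List.reverse_nil, List.nil_append] at hA hB
      simp only [h] at *
      rw [hA, ← hB]; rfl
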